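-- pv_equiv track=rewrite | github.com/nlp-waseda/twitter-dialog-crawler | crawler/crawl.py | filter_dialog
-- ===== SOURCE A (Python) =====
-- from typing import List, Optional, Set, Tuple
--
-- def filter_dialog(full_texts: List[str], user_ids: List[str]) -> bool:
--     # not dialog
--     if len(full_texts) < 2:
--         return False
--
--     # not bi-party
--     if len(set(user_ids)) != 2:
--         return False
--
--     # not in turns
--     if any(user_ids[i] == user_ids[i+1] for i in range(len(user_ids) - 1)):
--         return False
--
--     return True
-- ===== SOURCE B (Python) =====
-- from typing import List
--
-- def filter_dialog(full_texts: List[str], user_ids: List[str]) -> bool: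
--     # not dialog
--     if len(full_texts) < 2:
--         return False
--     # fix the two speakers: a = first id, b = first id different from a
--     if not user_ids:
--         return False
--     a = user_ids[0]
--     b = next((u for u in user_ids if u != a), None)
--     if b is None:
--         return False
--     # strict alternation a, b, a, b, ...
--     for i, u in enumerate(user_ids):
--         if u != (a if i % 2 == 0 else b):
--             return False
--     return True
-- ===== Notes on version B (the rewrite author's own statement) =====
-- stated objective: alternative
-- what changed: Replaces the set-cardinality test plus pairwise adjacent scan with a single expected-alternation check: fix a = first id and b = first different id, then verify every even position holds a and every odd position holds b.
import Mathlib
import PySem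

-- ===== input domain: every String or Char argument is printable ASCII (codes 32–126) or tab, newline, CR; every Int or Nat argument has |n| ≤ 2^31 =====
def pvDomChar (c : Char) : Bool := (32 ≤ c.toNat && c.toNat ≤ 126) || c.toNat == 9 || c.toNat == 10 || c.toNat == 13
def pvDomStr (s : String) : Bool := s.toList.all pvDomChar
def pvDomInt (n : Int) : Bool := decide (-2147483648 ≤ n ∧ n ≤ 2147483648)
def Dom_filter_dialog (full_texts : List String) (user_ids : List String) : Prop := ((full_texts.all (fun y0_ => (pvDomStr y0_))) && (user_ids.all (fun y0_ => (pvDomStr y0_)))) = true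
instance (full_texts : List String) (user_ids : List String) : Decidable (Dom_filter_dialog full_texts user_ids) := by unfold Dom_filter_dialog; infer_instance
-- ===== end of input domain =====

-- B checks the two-speaker alternation pattern directly (first id a at even positions, first
-- different id b at odd positions) instead of A's set-cardinality test plus pairwise adjacent
-- scan; same cost, different decomposition.

-- ===== PORT A =====
def filter_dialog (full_texts : List String) (user_ids : List String) : Bool :=
  if full_texts.length < 2 then false
  else if (PySem.Set.ofList user_ids).length ≠ 2 then false
  else if (PySem.List.pyRange 0 ((user_ids.length : Int) - 1) 1).any
      (fun i => PySem.List.pyGet? user_ids i == PySem.List.pyGet? user_ids (i + 1)) then false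
  else true

-- ===== PORT B =====
def filter_dialog_alt (full_texts : List String) (user_ids : List String) : Bool :=
  if full_texts.length < 2 then false
  else
    match PySem.List.pyGet? user_ids 0 with   -- 'if not user_ids: return False; a = user_ids[0]'
    | none => false
    | some a =>
      match user_ids.find? (fun u => u != a) with
      | none => false
      | some b =>
        (PySem.List.enumerate user_ids).all
          (fun p => p.2 == (if PySem.Int.mod p.1 2 == 0 then a else b))

-- ===== PRECONDITION & SPEC =====
def Spec_filter_dialog (full_texts : List String) (user_ids : List String) (out : Bool) : Prop := out = filter_dialog_alt full_texts user_ids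
instance (full_texts : List String) (user_ids : List String) (out : Bool) : Decidable (Spec_filter_dialog full_texts user_ids out) := by unfold Spec_filter_dialog; infer_instance

-- ===== CLAIM (what is proved, stated in full; the proofs are below) =====
def Claim_equal_filter_dialog : Prop := ∀ (full_texts : List String) (user_ids : List String), Dom_filter_dialog full_texts user_ids → Spec_filter_dialog full_texts user_ids (filter_dialog full_texts user_ids)

-- ===== LEMMAS AND PROOFS =====

-- alternation checker used only by the proofs: pvChk a b L ↔ L = [a, b, a, b, …]
def pvChk (a b : String) : List String → Bool
  | [] => true
  | x :: xs => (x == a) && pvChk b a xs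

theorem pvMod2 (a : Int) : PySem.Int.mod a 2 = a % 2 := by
  simp [PySem.Int.mod, Int.fmod_eq_emod]

theorem pvModFlip (s : Int) : (PySem.Int.mod (s + 1) 2 == 0) = !(PySem.Int.mod s 2 == 0) := by
  rw [pvMod2, pvMod2]
  rcases Int.emod_two_eq s with h2 | h2 <;> simp [h2] <;> omega

theorem pvEnumAll (a b : String) (L : List String) : ∀ s : Int,
    (PySem.List.enumerate L s).all
      (fun p => p.2 == (if PySem.Int.mod p.1 2 == 0 then a else b))
    = if PySem.Int.mod s 2 == 0 then pvChk a b L else pvChk b a L := by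
  induction L with
  | nil => intro s; simp [PySem.List.enumerate_nil, pvChk]
  | cons x xs ih =>
    intro s
    rw [PySem.List.enumerate_cons]
    simp only [List.all_cons]
    rw [ih (s + 1), pvModFlip]
    cases h : PySem.Int.mod s 2 == 0 <;> simp [pvChk]

theorem pvChk_mem : ∀ (L : List String) (a b : String), pvChk a b L = true →
    ∀ x ∈ L, x = a ∨ x = b := by
  intro L
  induction L with
  | nil => intro a b _ x hx; cases hx
  | cons y ys ih =>
    intro a b h x hx
    rw [pvChk, Bool.and_eq_true, beq_iff_eq] at h
    rcases List.mem_cons.mp hx with hx | hx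
    · left; rw [hx]; exact h.1
    · rcases ih b a h.2 x hx with hba | hba
      · right; exact hba
      · left; exact hba

theorem pvChk_chain : ∀ (L : List String) (a b : String), a ≠ b → pvChk a b L = true →
    List.IsChain (· ≠ ·) L := by
  intro L
  induction L with
  | nil => intro a b _ _; exact List.isChain_nil
  | cons y ys ih =>
    intro a b hab h
    rw [pvChk, Bool.and_eq_true, beq_iff_eq] at h
    rw [List.isChain_cons]
    refine ⟨?_, ih b a (Ne.symm hab) h.2⟩
    intro z hz
    cases ys with
    | nil => cases hz
    | cons w ws =>
      have hw : w = b := by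
        have := h.2
        rw [pvChk, Bool.and_eq_true, beq_iff_eq] at this
        exact this.1
      rw [List.head?_cons, Option.mem_some_iff] at hz
      rw [h.1, ← hz, hw]; exact hab

theorem pvChk_of : ∀ (L : List String) (a b : String), a ≠ b →
    (∀ x ∈ L, x = a ∨ x = b) → List.IsChain (· ≠ ·) L →
    (∀ y ∈ L.head?, y = a) → pvChk a b L = true := by
  intro L
  induction L with
  | nil => intro a b _ _ _ _; rfl
  | cons y ys ih =>
    intro a b hab hmem hch hhd
    have hy : y = a := hhd y (by simp)
    rw [pvChk, Bool.and_eq_true, beq_iff_eq]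
    rw [List.isChain_cons] at hch
    refine ⟨hy, ih b a (Ne.symm hab) ?_ hch.2 ?_⟩
    · intro x hx
      rcases hmem x (List.mem_cons_of_mem _ hx) with hba | hba
      · right; exact hba
      · left; exact hba
    · intro z hz
      have hz' : y ≠ z := hch.1 z hz
      have hzys : z ∈ ys := by
        cases ys with
        | nil => cases hz
        | cons w ws => rw [List.head?_cons, Option.mem_some_iff] at hz; rw [hz]; simp
      rcases hmem z (List.mem_cons_of_mem _ hzys) with hba | hba
      · exact absurd (hba.trans hy.symm) (Ne.symm hz')
      · exact hba

theorem pvAnyAdj (L : List String) :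
    ((PySem.List.pyRange 0 ((L.length : Int) - 1) 1).any
      (fun i => PySem.List.pyGet? L i == PySem.List.pyGet? L (i + 1)) = false)
    ↔ List.IsChain (· ≠ ·) L := by
  rw [List.any_eq_false, List.isChain_iff_getElem]
  constructor
  · intro h i hi heq
    have hmem : (i : Int) ∈ PySem.List.pyRange 0 ((L.length : Int) - 1) 1 := by
      rw [PySem.List.mem_pyRange_one]
      exact ⟨Int.natCast_nonneg i, by omega⟩
    apply h _ hmem
    have h1 : PySem.List.pyGet? L (i : Int) = some L[i] := by
      rw [PySem.List.pyGet?_natCast]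
      exact List.getElem?_eq_getElem (by omega)
    have h2 : PySem.List.pyGet? L ((i : Int) + 1) = some L[i + 1] := by
      have hc : ((i : Int) + 1) = ((i + 1 : Nat) : Int) := by push_cast; ring
      rw [hc, PySem.List.pyGet?_natCast]
      exact List.getElem?_eq_getElem hi
    rw [h1, h2, heq]
    simp
  · intro h x hx hbeq
    rw [PySem.List.mem_pyRange_one] at hx
    obtain ⟨h0, h1⟩ := hx
    have hlt : x.toNat + 1 < L.length := by omega
    have e1 : PySem.List.pyGet? L x = some L[x.toNat] := by
      rw [PySem.List.pyGet?_of_nonneg _ h0]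
      exact List.getElem?_eq_getElem (by omega)
    have e2 : PySem.List.pyGet? L (x + 1) = some L[x.toNat + 1] := by
      rw [PySem.List.pyGet?_of_nonneg _ (by omega)]
      have ht : (x + 1).toNat = x.toNat + 1 := by omega
      rw [ht]
      exact List.getElem?_eq_getElem hlt
    rw [e1, e2] at hbeq
    simp only [beq_iff_eq, Option.some.injEq] at hbeq
    exact h x.toNat hlt hbeq

theorem pvLenNe2 (L : List String) (a : String) (hall : ∀ x ∈ L, x = a) :
    (PySem.Set.ofList L).length ≠ 2 := by
  have hsub : PySem.Set.ofList L ⊆ [a] := by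
    intro x hx
    rw [PySem.Set.mem_ofList] at hx
    simp [hall x hx]
  have hle := (List.subperm_of_subset (PySem.Set.nodup_ofList L) hsub).length_le
  simp at hle; omega

theorem pvMem2 (L : List String) (a b : String) (ha : a ∈ L) (hb : b ∈ L) (hab : a ≠ b)
    (hlen : (PySem.Set.ofList L).length = 2) : ∀ x ∈ L, x = a ∨ x = b := by
  have hsub : [a, b] ⊆ PySem.Set.ofList L := by
    intro x hx
    rw [PySem.Set.mem_ofList]
    rcases List.mem_pair.mp hx with h | h <;> rw [h] <;> assumption
  have hnd : ([a, b] : List String).Nodup := by simp [hab]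
  have hperm := (List.subperm_of_subset hnd hsub).perm_of_length_le (by rw [hlen]; simp)
  intro x hx
  have hx2 : x ∈ ([a, b] : List String) :=
    hperm.mem_iff.mpr (by rw [PySem.Set.mem_ofList]; exact hx)
  exact List.mem_pair.mp hx2

theorem pvLen2 (L : List String) (a b : String) (ha : a ∈ L) (hb : b ∈ L) (hab : a ≠ b)
    (hmem : ∀ x ∈ L, x = a ∨ x = b) : (PySem.Set.ofList L).length = 2 := by
  have hsub1 : PySem.Set.ofList L ⊆ [a, b] := by
    intro x hx
    rw [PySem.Set.mem_ofList] at hx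
    rcases hmem x hx with h | h <;> simp [h]
  have hsub2 : [a, b] ⊆ PySem.Set.ofList L := by
    intro x hx
    rw [PySem.Set.mem_ofList]
    rcases List.mem_pair.mp hx with h | h <;> rw [h] <;> assumption
  have h1 := (List.subperm_of_subset (PySem.Set.nodup_ofList L) hsub1).length_le
  have h2 := (List.subperm_of_subset (by simp [hab]) hsub2).length_le
  simp at h1 h2; omega

theorem pvLemA (ft L : List String) (hft : ¬ ft.length < 2) :
    filter_dialog ft L = true ↔
      ((PySem.Set.ofList L).length = 2 ∧ List.IsChain (· ≠ ·) L) := by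
  unfold filter_dialog
  rw [if_neg hft]
  by_cases h2 : (PySem.Set.ofList L).length = 2
  · rw [if_neg (by omega)]
    cases hany : (PySem.List.pyRange 0 ((L.length : Int) - 1) 1).any
        (fun i => PySem.List.pyGet? L i == PySem.List.pyGet? L (i + 1)) with
    | false => simp [h2, (pvAnyAdj L).mp hany]
    | true =>
      have hnc : ¬ List.IsChain (· ≠ ·) L := by
        intro hch
        rw [← pvAnyAdj L, hany] at hch
        cases hch
      simp [hnc]
  · rw [if_pos (by omega)]
    simp [h2]

theorem pvLemB (ft L : List String) (hft : ¬ ft.length < 2) :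
    filter_dialog_alt ft L = true ↔
      ((PySem.Set.ofList L).length = 2 ∧ List.IsChain (· ≠ ·) L) := by
  unfold filter_dialog_alt
  rw [if_neg hft]
  cases L with
  | nil =>
    show false = true ↔ _
    simp [PySem.Set.ofList_nil]
  | cons a rest =>
    rw [PySem.List.pyGet?_zero_cons]
    dsimp only
    cases hfind : (a :: rest).find? (fun u => u != a) with
    | none =>
      dsimp only
      rw [List.find?_eq_none] at hfind
      have hall : ∀ x ∈ a :: rest, x = a := by
        intro x hx
        simpa using hfind x hx
      simp only [Bool.false_eq_true, false_iff]
      exact fun h => pvLenNe2 _ a hall h.1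
    | some b =>
      dsimp only
      have hbne : b ≠ a := by
        have := List.find?_some hfind
        simpa using this
      have hbmem : b ∈ a :: rest := List.mem_of_find?_eq_some hfind
      have hamem : a ∈ a :: rest := by simp
      rw [pvEnumAll a b (a :: rest) 0]
      rw [show (PySem.Int.mod 0 2 == 0) = true from rfl, if_pos rfl]
      constructor
      · intro hchk
        exact ⟨pvLen2 _ a b hamem hbmem (Ne.symm hbne)
          (pvChk_mem _ a b hchk), pvChk_chain _ a b (Ne.symm hbne) hchk⟩
      · intro hlc
        exact pvChk_of _ a b (Ne.symm hbne)
          (pvMem2 _ a b hamem hbmem (Ne.symm hbne) hlc.1) hlc.2 (by simp)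

-- ===== VERDICT (by name: the statement is the Claim_ definition above) =====
theorem filter_dialog_spec : Claim_equal_filter_dialog := by
  intro ft L _hdom
  unfold Spec_filter_dialog
  by_cases hft : ft.length < 2
  · simp [filter_dialog, filter_dialog_alt, hft]
  · have h1 := pvLemA ft L hft
    have h2 := pvLemB ft L hft
    cases hA : filter_dialog ft L with
    | true => exact (h2.mpr (h1.mp hA)).symm
    | false =>
      cases hB : filter_dialog_alt ft L with
      | false => rfl
      | true => rw [h1.mpr (h2.mp hB)] at hA; cases hA
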